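-- pv_equiv track=rewrite | github.com/IES-Rafael-Alberti/dawb1-2425-ejercicios-u2-Lmrocio | src/ej22_08.py | obtener_triangulo
-- ===== SOURCE A (Python) =====
-- def obtener_triangulo(num) -> str:
--     cadena = ''
--     triangulo = ''
--     if num%2 != 0:
--         for i in range(1, num+1, 2):
--             cadena += str(i) + ' '
--             triangulo += cadena[::-1] + '\n'
--     else:
--         for i in range(0, num+1, 2):
--             cadena += str(i) + ' '
--             triangulo += cadena[::-1] + '\n'
--
--     return triangulo
-- ===== SOURCE B (Python) =====
-- def obtener_triangulo(num) -> str: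
--     start = 1 if num % 2 != 0 else 0
--     tokens = [str(i) + ' ' for i in range(start, num + 1, 2)]
--     R = ''.join(tokens)[::-1]
--     out = []
--     lens = 0
--     for t in tokens:
--         lens += len(t)
--         out.append(R[len(R) - lens:] + '\n')
--     return ''.join(out)
-- ===== Notes on version B (the rewrite author's own statement) =====
-- stated objective: alternative
-- what changed: A re-reverses the whole accumulated string on every iteration; B joins all tokens once, reverses that string a single time, and emits each line as a growing suffix of the reversed string tracked by a running length (intended as faster; measured ~1.7-2.0x but unconfirmed at the largest probe size).
import Mathlib
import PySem

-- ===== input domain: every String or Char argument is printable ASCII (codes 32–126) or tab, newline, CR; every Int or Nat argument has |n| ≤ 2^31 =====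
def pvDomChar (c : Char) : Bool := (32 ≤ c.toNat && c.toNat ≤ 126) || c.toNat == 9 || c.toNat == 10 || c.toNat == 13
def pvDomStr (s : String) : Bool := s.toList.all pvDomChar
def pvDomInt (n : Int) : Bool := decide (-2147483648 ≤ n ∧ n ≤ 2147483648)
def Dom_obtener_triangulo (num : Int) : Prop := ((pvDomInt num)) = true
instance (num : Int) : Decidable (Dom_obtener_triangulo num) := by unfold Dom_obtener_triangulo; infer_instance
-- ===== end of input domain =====

-- B reverses the joined token string ONCE and emits each line as a growing suffix of it
-- (tracked by a running consumed length), instead of A's per-iteration reversal of the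
-- whole accumulated string.

-- ===== PORT A =====
-- loop body of A over the remaining range, state = (cadena, triangulo) as char lists;
-- cadena[::-1] is character reversal (PySem.List.slice?_none_none_neg_one: s[::-1] = reverse)
def pvStepsA : List Int → List Char → List Char → List Char
  | [], _, triangulo => triangulo
  | i :: rest, cadena, triangulo =>
      let cadena' := cadena ++ (PySem.Int.toChars i) ++ [' ']
      pvStepsA rest cadena' (triangulo ++ cadena'.reverse ++ ['\n'])

def obtener_triangulo (num : Int) : String :=
  if PySem.Int.mod num 2 ≠ 0 then
    String.ofList (pvStepsA (PySem.List.pyRange 1 (num + 1) 2) [] [])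
  else
    String.ofList (pvStepsA (PySem.List.pyRange 0 (num + 1) 2) [] [])

-- ===== PORT B =====
-- the token str(i) + ' ' for each i of the range
def pvTokensB (l : List Int) : List (List Char) :=
  l.map (fun i => (PySem.Int.toChars i) ++ [' '])

-- loop of B: running consumed length `lens`; R[len(R)-lens':] is R.drop (R.length - lens')
-- (exact: lens' ≤ R.length always holds, and a Python slice start clamps at 0 anyway)
def pvStepsB (R : List Char) : List (List Char) → Nat → List Char → List Char
  | [], _, out => out
  | t :: rest, lens, out =>
      let lens' := lens + t.length
      pvStepsB R rest lens' (out ++ R.drop (R.length - lens') ++ ['\n'])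

def obtener_triangulo_alt (num : Int) : String :=
  let start : Int := if PySem.Int.mod num 2 ≠ 0 then 1 else 0
  let tokens := pvTokensB (PySem.List.pyRange start (num + 1) 2)
  let R := tokens.flatten.reverse
  String.ofList (pvStepsB R tokens 0 [])

-- ===== PRECONDITION & SPEC =====
def Spec_obtener_triangulo (num : Int) (out : String) : Prop := out = obtener_triangulo_alt num
instance (num : Int) (out : String) : Decidable (Spec_obtener_triangulo num out) := by unfold Spec_obtener_triangulo; infer_instance

-- ===== CLAIM (what is proved, stated in full; the proofs are below) =====
def Claim_equal_obtener_triangulo : Prop := ∀ (num : Int), Dom_obtener_triangulo num → Spec_obtener_triangulo num (obtener_triangulo num)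

-- ===== LEMMAS AND PROOFS =====

-- B's accumulator splits off
lemma pvStepsB_acc (R : List Char) (ts : List (List Char)) (lens : Nat) (out : List Char) :
    pvStepsB R ts lens out = out ++ pvStepsB R ts lens [] := by
  induction ts generalizing lens out with
  | nil => simp [pvStepsB]
  | cons t rest ih =>
      simp only [pvStepsB, List.nil_append]
      rw [ih, ih (lens + t.length) (List.drop (R.length - (lens + t.length)) R ++ ['\n'])]
      simp

-- main invariant: A's loop from state (c, t) equals t ++ B's loop over the tokens of the
-- remaining range, with R the reversal of the FULL final string and lens = c.length
lemma pvMain (l : List Int) (c t : List Char) :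
    pvStepsA l c t
      = t ++ pvStepsB ((c ++ (pvTokensB l).flatten).reverse) (pvTokensB l) c.length [] := by
  induction l generalizing c t with
  | nil => simp [pvStepsA, pvStepsB, pvTokensB]
  | cons i rest ih =>
      have hdrop : ∀ (A B : List Char), (A ++ B).drop ((A ++ B).length - B.length) = B := by
        intro A B
        have h1 : (A ++ B).length - B.length = A.length := by simp
        rw [h1, List.drop_left]
      simp only [pvStepsA]
      rw [List.append_assoc c, ih]
      conv_rhs => rw [show pvTokensB (i :: rest)
          = (PySem.Int.toChars i ++ [' ']) :: pvTokensB rest from rfl]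
      simp only [pvStepsB, List.nil_append, List.flatten_cons]
      conv_rhs => rw [pvStepsB_acc]
      have hassoc : c ++ (PySem.Int.toChars i ++ [' '] ++ (pvTokensB rest).flatten)
          = (c ++ (PySem.Int.toChars i ++ [' '])) ++ (pvTokensB rest).flatten := by
        simp [List.append_assoc]
      rw [hassoc]
      have hrev : ((c ++ (PySem.Int.toChars i ++ [' '])) ++ (pvTokensB rest).flatten).reverse
          = (pvTokensB rest).flatten.reverse ++ (c ++ (PySem.Int.toChars i ++ [' '])).reverse := by
        simp
      have hlen : c.length + (PySem.Int.toChars i ++ [' ']).length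
          = (c ++ (PySem.Int.toChars i ++ [' '])).reverse.length := by
        simp
        omega
      rw [hrev, hlen, hdrop, List.length_reverse]
      simp [List.append_assoc]

-- ===== VERDICT (by name: the statement is the Claim_ definition above) =====
theorem obtener_triangulo_spec : Claim_equal_obtener_triangulo := by
  intro num _
  unfold Spec_obtener_triangulo obtener_triangulo obtener_triangulo_alt
  by_cases h : PySem.Int.mod num 2 ≠ 0
  · simp only [if_pos h]
    rw [pvMain]; simp
  · simp only [if_neg h]
    rw [pvMain]; simp
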